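-- pv_equiv track=rewrite | github.com/zganzone/pvpgn-webportal | d2consoleportal/10.charitemstat.py | group_and_format_list
-- ===== SOURCE A (Python) =====
-- from collections import defaultdict
-- from typing import List, Dict, Any, Union
--
-- def group_and_format_list(item_list: List[str]) -> List[str]:
--     counts = defaultdict(int)
--     for item in item_list:
--         counts[item] += 1
--
--     formatted_list = []
--     for name, count in sorted(counts.items()):
--         if count > 1:
--             formatted_list.append(f"{name} ({count})")
--         else:
--             formatted_list.append(name)
--
--     return formatted_list
-- ===== SOURCE B (Python) =====
-- def group_and_format_list(item_list):
--     s = sorted(item_list)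
--     out = []
--     i = 0
--     n = len(s)
--     while i < n:
--         j = i + 1
--         while j < n and s[j] == s[i]:
--             j += 1
--         count = j - i
--         out.append(f"{s[i]} ({count})" if count > 1 else s[i])
--         i = j
--     return out
-- ===== Notes on version B (the rewrite author's own statement) =====
-- stated objective: alternative
-- what changed: Replaces the defaultdict counting pass followed by sorting the (name,count) pairs with a sort of the raw list first and a single run-length scan over adjacent equal elements.
import Mathlib
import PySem

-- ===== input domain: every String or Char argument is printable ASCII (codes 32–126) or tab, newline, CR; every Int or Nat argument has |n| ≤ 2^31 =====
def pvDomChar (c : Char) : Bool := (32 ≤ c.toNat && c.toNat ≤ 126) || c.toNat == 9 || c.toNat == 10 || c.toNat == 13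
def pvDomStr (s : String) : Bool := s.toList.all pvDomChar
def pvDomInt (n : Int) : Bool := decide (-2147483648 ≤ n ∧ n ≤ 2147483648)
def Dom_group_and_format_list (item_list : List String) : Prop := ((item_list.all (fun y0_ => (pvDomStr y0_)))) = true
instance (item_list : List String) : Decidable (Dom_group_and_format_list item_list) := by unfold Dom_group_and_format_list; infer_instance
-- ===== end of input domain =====

-- B replaces A's count-in-a-dict-then-sort-the-items strategy by sort-first-then-run-length-scan; same cost, no hash table.

-- f"{name} ({count})" (identical in both Pythons)
def pvFmt (name : String) (c : Int) : String := name ++ " (" ++ PySem.Int.toStr c ++ ")"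

-- ===== PORT A =====
def group_and_format_list (item_list : List String) : List String :=
  let counts : PySem.Dict String Int :=
    item_list.foldl (fun d item => d.modify item 0 (· + 1)) PySem.Dict.empty
  (PySem.List.sorted2 counts.items (fun p => p.1) (fun p => p.2)).foldl
    (fun acc p => if p.2 > 1 then acc ++ [pvFmt p.1 p.2] else acc ++ [p.1]) []

-- ===== PORT B =====
-- the outer while loop: consume the sorted list run by run (inner while = takeWhile over the run)
def pvRuns (acc : List String) : List String → List String
  | [] => acc
  | x :: rest =>
      let c : Int := ((rest.takeWhile (fun y => y == x)).length : Int) + 1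
      pvRuns (acc ++ [if c > 1 then pvFmt x c else x]) (rest.dropWhile (fun y => y == x))
  termination_by l => l.length
  decreasing_by
    simp only [List.length_cons]
    exact Nat.lt_succ_of_le (List.length_dropWhile_le _ _)

def group_and_format_list_alt (item_list : List String) : List String :=
  pvRuns [] (PySem.List.sorted item_list (fun x => x))

-- ===== PRECONDITION & SPEC =====
def Spec_group_and_format_list (item_list : List String) (out : List String) : Prop := out = group_and_format_list_alt item_list
instance (item_list : List String) (out : List String) : Decidable (Spec_group_and_format_list item_list out) := by unfold Spec_group_and_format_list; infer_instance

-- ===== CLAIM (what is proved, stated in full; the proofs are below) =====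
def Claim_equal_group_and_format_list : Prop := ∀ (item_list : List String), Dom_group_and_format_list item_list → Spec_group_and_format_list item_list (group_and_format_list item_list)

-- ===== LEMMAS AND PROOFS =====

-- the canonical value both programs compute
def pvCanon (l : List String) : List String :=
  (PySem.List.sorted (PySem.Set.ofList l) (fun x => x)).map
    (fun k => if ((l.count k : Int)) > 1 then pvFmt k (l.count k) else k)

lemma insertBy_congr {α : Type} (f g : α → α → Bool) (x : α) (ys : List α)
    (h : ∀ b ∈ ys, f x b = g x b) :
    PySem.List.insertBy f x ys = PySem.List.insertBy g x ys := by
  induction ys with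
  | nil => rfl
  | cons y ys ih =>
      simp only [PySem.List.insertBy]
      rw [h y (by simp)]
      split
      · rfl
      · rw [ih (fun b hb => h b (by simp [hb]))]

lemma foldl_insertBy_congr {α : Type} (f g : α → α → Bool) (xs acc : List α)
    (h : ∀ a ∈ xs, ∀ b, (b ∈ xs ∨ b ∈ acc) → f a b = g a b)
    (hacc : ∀ a ∈ xs, ∀ b ∈ acc, f a b = g a b) :
    xs.foldl (fun a x => PySem.List.insertBy f x a) acc
      = xs.foldl (fun a x => PySem.List.insertBy g x a) acc := by
  induction xs generalizing acc with
  | nil => rfl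
  | cons x xs ih =>
      simp only [List.foldl_cons]
      rw [insertBy_congr f g x acc
        (fun b hb => hacc x (by simp) b hb)]
      exact ih _ (fun a ha b hb => h a (by simp [ha]) b
          (by rcases hb with hb | hb
              · exact Or.inl (by simp [hb])
              · rw [PySem.List.mem_insertBy] at hb
                rcases hb with rfl | hb
                · exact Or.inl (by simp)
                · exact Or.inr hb))
        (fun a ha b hb => by
          rw [PySem.List.mem_insertBy] at hb
          rcases hb with rfl | hb
          · exact h a (by simp [ha]) b (Or.inl (by simp))
          · exact hacc a (by simp [ha]) b hb)

-- with pairwise-distinct first components, the tuple sort of A is a sort by the first component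
lemma sorted2_eq_sorted_fst (ps : List (String × Int)) (hnd : (ps.map Prod.fst).Nodup) :
    PySem.List.sorted2 ps (fun p => p.1) (fun p => p.2)
      = PySem.List.sorted ps (fun p => p.1) := by
  rw [PySem.List.sorted_eq_foldl_insertBy]
  show ps.foldl (fun a x => PySem.List.insertBy _ x a) [] = _
  apply foldl_insertBy_congr
  · intro a ha b hb
    rcases hb with hb | hb
    · by_cases hab : a.1 = b.1
      · have hae : a = b := List.inj_on_of_nodup_map hnd ha hb hab
        subst hae
        simp
      · rcases lt_or_gt_of_ne hab with h1 | h1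
        · simp [h1]
        · simp [h1, not_lt_of_gt h1]
    · simp at hb
  · intro a _ b hb
    simp at hb

lemma a_eq_canon (l : List String) : group_and_format_list l = pvCanon l := by
  show (PySem.List.sorted2 (PySem.Dict.counter l).items (fun p => p.1) (fun p => p.2)).foldl
      (fun acc p => if p.2 > 1 then acc ++ [pvFmt p.1 p.2] else acc ++ [p.1]) [] = _
  have hitems : (PySem.Dict.counter l).items
      = (PySem.Set.ofList l).map (fun k => (k, (l.count k : Int))) :=
    PySem.Dict.items_counter l
  have hnd : ((PySem.Dict.counter l).items.map Prod.fst).Nodup := by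
    rw [hitems, List.map_map]
    have : (Prod.fst ∘ fun k => (k, (l.count k : Int))) = id := rfl
    rw [this, List.map_id]
    exact PySem.Set.nodup_ofList l
  rw [sorted2_eq_sorted_fst _ hnd]
  have hsorted : PySem.List.sorted (PySem.Dict.counter l).items (fun p => p.1)
      = (PySem.List.sorted (PySem.Set.ofList l) (fun x => x)).map
          (fun k => (k, (l.count k : Int))) := by
    apply PySem.List.sorted_eq_of_perm_of_pairwise_lt
    · rw [hitems]
      exact (PySem.List.sorted_perm _ _ _).map _
    · exact (PySem.List.sorted_ofList_pairwise_lt l).map _ (fun a b h => h)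
  rw [hsorted]
  have hfun : ∀ (acc : List String) (p : String × Int),
      (if p.2 > 1 then acc ++ [pvFmt p.1 p.2] else acc ++ [p.1])
        = acc ++ [if p.2 > 1 then pvFmt p.1 p.2 else p.1] := by
    intro acc p
    split <;> rfl
  calc ((PySem.List.sorted (PySem.Set.ofList l) (fun x => x)).map
          (fun k => (k, (l.count k : Int)))).foldl
        (fun acc p => if p.2 > 1 then acc ++ [pvFmt p.1 p.2] else acc ++ [p.1]) []
      = ((PySem.List.sorted (PySem.Set.ofList l) (fun x => x)).map
          (fun k => (k, (l.count k : Int)))).foldl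
        (fun acc p => acc ++ [if p.2 > 1 then pvFmt p.1 p.2 else p.1]) [] := by
        apply PySem.List.foldl_congr_mem'
        intro p _ acc
        exact hfun acc p
    _ = pvCanon l := by
        rw [PySem.List.foldl_append_singleton_eq_map, List.map_map]
        rfl

lemma not_mem_dropWhile_beq (x : String) (rest : List String)
    (hp : rest.Pairwise (· ≤ ·)) (hx : ∀ y ∈ rest, x ≤ y) :
    x ∉ rest.dropWhile (fun y => y == x) := by
  induction rest with
  | nil => simp
  | cons r rs ih =>
      by_cases hr : (r == x) = true
      · simp only [List.dropWhile_cons, hr, if_true]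
        exact ih (hp.of_cons) (fun y hy => hx y (by simp [hy]))
      · simp only [List.dropWhile_cons, hr]
        intro hmem
        have hrx : r ≠ x := by simpa using hr
        rcases List.mem_cons.mp hmem with h | h
        · exact hrx h.symm
        · have h1 : r ≤ x := (List.pairwise_cons.mp hp).1 x h
          have h2 : x ≤ r := hx r (by simp)
          exact hrx (le_antisymm h1 h2)

lemma pvRuns_sorted : ∀ (n : ℕ) (s : List String), s.length = n →
    s.Pairwise (· ≤ ·) → ∀ (acc : List String),
    pvRuns acc s = acc ++ (PySem.List.sorted (PySem.Set.ofList s) (fun x => x)).map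
      (fun k => if ((s.count k : Int)) > 1 then pvFmt k (s.count k) else k) := by
  intro n
  induction n using Nat.strong_induction_on with
  | _ n ih =>
    intro s hlen hs acc
    match s with
    | [] => simp [pvRuns, PySem.List.sorted]
    | x :: rest =>
      rw [pvRuns]
      set t := rest.takeWhile (fun y => y == x) with ht
      set d := rest.dropWhile (fun y => y == x) with hd
      have hrest : t ++ d = rest := List.takeWhile_append_dropWhile
      have hpr : rest.Pairwise (· ≤ ·) := (List.pairwise_cons.mp hs).2
      have hxle : ∀ y ∈ rest, x ≤ y := (List.pairwise_cons.mp hs).1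
      have hxd : x ∉ d := not_mem_dropWhile_beq x rest hpr hxle
      have htx : ∀ y ∈ t, y = x := by
        intro y hy
        have := List.mem_takeWhile_imp hy
        simpa using this
      have hdmem : ∀ y ∈ d, y ∈ rest := by
        intro y hy
        rw [← hrest]
        exact List.mem_append_right _ hy
      have hxltd : ∀ y ∈ d, x < y := by
        intro y hy
        rcases lt_or_eq_of_le (hxle y (hdmem y hy)) with h | h
        · exact h
        · exact absurd (h ▸ hy) hxd
      have hcount_t : t.count x = t.length := by
        rw [List.count_eq_length]
        intro y hy
        exact (htx y hy).symm
      have hcount_x : (x :: rest).count x = t.length + 1 := by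
        have hcd : d.count x = 0 := List.count_eq_zero.mpr hxd
        rw [List.count_cons_self, ← hrest, List.count_append, hcd, hcount_t]
      have hcount_d : ∀ k ∈ d, (x :: rest).count k = d.count k := by
        intro k hk
        have hkx : k ≠ x := fun h => hxd (h ▸ hk)
        have hkt : t.count k = 0 := by
          rw [List.count_eq_zero]
          intro hmem
          exact hkx (htx k hmem)
        rw [List.count_cons_of_ne (Ne.symm hkx), ← hrest, List.count_append, hkt, Nat.zero_add]
      have hpd : d.Pairwise (· ≤ ·) := by
        have : d.Sublist rest := by
          rw [← hrest]
          exact List.sublist_append_right t d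
        exact hpr.sublist this
      have hdlt : d.length < n := by
        rw [← hlen]
        simp only [List.length_cons]
        exact Nat.lt_succ_of_le (List.length_dropWhile_le _ _)
      -- the sorted distinct elements of x :: rest are x followed by those of d
      have hnds : (PySem.Set.ofList (x :: rest) : List String).Nodup :=
        PySem.Set.nodup_ofList _
      have hndd : (PySem.List.sorted (PySem.Set.ofList d) (fun x => x)).Nodup :=
        ((PySem.List.sorted_perm _ _ _).nodup_iff).mpr (PySem.Set.nodup_ofList d)
      have hxnotin : x ∉ PySem.List.sorted (PySem.Set.ofList d) (fun x => x) := by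
        rw [PySem.List.mem_sorted, PySem.Set.mem_ofList]
        exact hxd
      have hsplit : PySem.List.sorted (PySem.Set.ofList (x :: rest)) (fun x => x)
          = x :: PySem.List.sorted (PySem.Set.ofList d) (fun x => x) := by
        apply PySem.List.sorted_eq_of_perm_of_pairwise_lt
        · rw [List.perm_ext_iff_of_nodup (List.nodup_cons.mpr ⟨hxnotin, hndd⟩) hnds]
          intro y
          simp only [List.mem_cons, PySem.List.mem_sorted, PySem.Set.mem_ofList]
          constructor
          · rintro (rfl | hy)
            · exact Or.inl rfl
            · exact Or.inr (hdmem y hy)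
          · rintro (rfl | hy)
            · exact Or.inl rfl
            · rw [← hrest] at hy
              rcases List.mem_append.mp hy with hy | hy
              · exact Or.inl (htx y hy)
              · exact Or.inr hy
        · rw [List.pairwise_cons]
          constructor
          · intro y hy
            rw [PySem.List.mem_sorted, PySem.Set.mem_ofList] at hy
            exact hxltd y hy
          · exact PySem.List.sorted_ofList_pairwise_lt d
      have hih := ih d.length hdlt d rfl hpd
        (acc ++ [if ((t.length : Int) + 1 > 1) then pvFmt x ((t.length : Int) + 1) else x])
      have hc : ((List.count x (x :: rest) : Int)) = (t.length : Int) + 1 := by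
        rw [hcount_x]; push_cast; ring
      have hmap : List.map (fun k => if ((List.count k d : Int)) > 1 then pvFmt k (List.count k d) else k)
            (PySem.List.sorted (PySem.Set.ofList d) (fun x => x))
          = List.map (fun k => if ((List.count k (x :: rest) : Int)) > 1 then pvFmt k (List.count k (x :: rest)) else k)
            (PySem.List.sorted (PySem.Set.ofList d) (fun x => x)) := by
        apply List.map_congr_left
        intro k hk
        rw [PySem.List.mem_sorted, PySem.Set.mem_ofList] at hk
        rw [hcount_d k hk]
      rw [hih, hmap]
      simp only [hsplit, List.map_cons]
      rw [hc]
      simp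

lemma b_eq_canon (l : List String) : group_and_format_list_alt l = pvCanon l := by
  show pvRuns [] (PySem.List.sorted l (fun x => x)) = _
  set s := PySem.List.sorted l (fun x => x) with hsdef
  have hperm : s.Perm l := PySem.List.sorted_perm l _ _
  have hrun := pvRuns_sorted s.length s rfl (PySem.List.sorted_pairwise l (fun x => x)) []
  rw [hrun, List.nil_append]
  have hofs : PySem.List.sorted (PySem.Set.ofList s) (fun x => x)
      = PySem.List.sorted (PySem.Set.ofList l) (fun x => x) := by
    apply PySem.List.sorted_eq_sorted_of_perm _ _ _ (fun a b h => h)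
    rw [List.perm_ext_iff_of_nodup (PySem.Set.nodup_ofList s) (PySem.Set.nodup_ofList l)]
    intro y
    rw [PySem.Set.mem_ofList, PySem.Set.mem_ofList]
    exact hperm.mem_iff
  rw [hofs]
  apply List.map_congr_left
  intro k _
  rw [hperm.count_eq k]

-- ===== VERDICT (by name: the statement is the Claim_ definition above) =====
theorem group_and_format_list_spec : Claim_equal_group_and_format_list := by
  intro l _
  show group_and_format_list l = group_and_format_list_alt l
  rw [a_eq_canon, b_eq_canon]
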